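-- pv_equiv track=rewrite | github.com/rolandbernard/adventofcode-all | 2015/20.infinite-elves-and-infinite-houses/part2.py | housePresents
-- ===== SOURCE A (Python) =====
-- def housePresents(num):
--     res = 0
--     div = max(num // 50, 1)
--     while div <= num:
--         if num % div == 0:
--             res += div
--         div += 1
--     return 11 * res
-- ===== SOURCE B (Python) =====
-- def housePresents(num):
--     res = 0
--     lo = max(num // 50, 1)
--     i = 1
--     while i * i <= num:
--         if num % i == 0:
--             if i >= lo:
--                 res += i
--             j = num // i
--             if j != i and j >= lo:
--                 res += j
--         i += 1
--     return 11 * res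
-- ===== Notes on version B (the rewrite author's own statement) =====
-- stated objective: faster
-- what changed: B enumerates divisor pairs (i, num//i) only up to sqrt(num) instead of scanning every candidate from the lower bound up to num.
import Mathlib
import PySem

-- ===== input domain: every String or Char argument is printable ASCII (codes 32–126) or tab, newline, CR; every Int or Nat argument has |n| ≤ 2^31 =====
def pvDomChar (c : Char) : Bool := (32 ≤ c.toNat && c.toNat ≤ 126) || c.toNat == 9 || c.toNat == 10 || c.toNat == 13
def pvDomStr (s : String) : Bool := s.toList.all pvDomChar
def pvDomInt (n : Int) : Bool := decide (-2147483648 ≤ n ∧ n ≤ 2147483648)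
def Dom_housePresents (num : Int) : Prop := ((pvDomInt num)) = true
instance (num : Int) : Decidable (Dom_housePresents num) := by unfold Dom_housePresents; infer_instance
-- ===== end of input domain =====

-- B enumerates divisor pairs (i, num // i) only up to √num instead of scanning every
-- candidate from the lower bound up to num; same return value, measured faster.

-- ===== PORT A =====
-- while div <= num: if num % div == 0: res += div; div += 1
-- (fuel = number of remaining loop iterations + 1, enough by construction at the call site)
def housePresentsLoopA (num res div : Int) : Nat → Int
  | 0 => res
  | fuel + 1 =>
    if div ≤ num then
      housePresentsLoopA num (if PySem.Int.mod num div = 0 then res + div else res) (div + 1) fuel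
    else res

def housePresents (num : Int) : Int :=
  11 * housePresentsLoopA num 0 (max (PySem.Int.floordiv num 50) 1)
        (num + 1 - max (PySem.Int.floordiv num 50) 1).toNat

-- ===== PORT B =====
-- while i * i <= num: if num % i == 0: add i (if i >= lo) and j = num // i (if j != i and j >= lo)
-- (fuel = number of remaining loop iterations + 1, enough by construction at the call site)
def housePresentsLoopB (num lo res i : Int) : Nat → Int
  | 0 => res
  | fuel + 1 =>
    if i * i ≤ num then
      housePresentsLoopB num lo
        (if PySem.Int.mod num i = 0 then
          (if lo ≤ i then res + i else res) +
            (if PySem.Int.floordiv num i ≠ i ∧ lo ≤ PySem.Int.floordiv num i then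
              PySem.Int.floordiv num i else 0)
        else res)
        (i + 1) fuel
    else res

def housePresents_alt (num : Int) : Int :=
  11 * housePresentsLoopB num (max (PySem.Int.floordiv num 50) 1) 0 1 num.toNat

-- ===== PRECONDITION & SPEC =====
def Spec_housePresents (num : Int) (out : Int) : Prop := out = housePresents_alt num
instance (num : Int) (out : Int) : Decidable (Spec_housePresents num out) := by unfold Spec_housePresents; infer_instance

-- ===== CLAIM (what is proved, stated in full; the proofs are below) =====
def Claim_equal_housePresents : Prop := ∀ (num : Int), Dom_housePresents num → Spec_housePresents num (housePresents num)

-- ===== LEMMAS AND PROOFS =====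

-- A's loop sums the divisors of num lying in [div, num].
theorem loopA_eq (num : Int) (fuel : Nat) : ∀ (res div : Int), num + 1 - div ≤ (fuel : Int) →
    housePresentsLoopA num res div fuel
      = res + ∑ d ∈ Finset.Icc div num, (if d ∣ num then d else 0) := by
  induction fuel with
  | zero =>
    intro res div hf
    have : Finset.Icc div num = ∅ := Finset.Icc_eq_empty (by simp at hf; omega)
    simp [housePresentsLoopA, this]
  | succ fuel ih =>
    intro res div hf
    rw [housePresentsLoopA]
    split
    case isTrue h =>
      rw [ih _ (div + 1) (by push_cast at hf ⊢; omega)]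
      have hins : Finset.Icc div num = insert div (Finset.Icc (div + 1) num) := by
        ext x; simp [Finset.mem_Icc]; omega
      have hnot : div ∉ Finset.Icc (div + 1) num := by simp [Finset.mem_Icc]
      rw [hins, Finset.sum_insert hnot]
      simp only [PySem.Int.mod_eq_zero_iff_dvd]
      split_ifs <;> ring
    case isFalse h =>
      have : Finset.Icc div num = ∅ := Finset.Icc_eq_empty (by omega)
      simp [this]

-- The per-index contribution of B's loop (in pure arithmetic form).
def contribB (num lo k : Int) : Int :=
  if k ∣ num then
    (if lo ≤ k then k else 0) +
      (if num / k ≠ k ∧ lo ≤ num / k then num / k else 0)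
  else 0

-- B's loop sums contribB over indices k ∈ [i, num] with k * k ≤ num (for i ≥ 1).
theorem loopB_eq (num lo : Int) (fuel : Nat) :
    ∀ (res i : Int), 1 ≤ i → num + 1 - i ≤ (fuel : Int) →
    housePresentsLoopB num lo res i fuel
      = res + ∑ k ∈ Finset.Icc i num, (if k * k ≤ num then contribB num lo k else 0) := by
  induction fuel with
  | zero =>
    intro res i hi hf
    have : Finset.Icc i num = ∅ := Finset.Icc_eq_empty (by simp at hf; omega)
    simp [housePresentsLoopB, this]
  | succ fuel ih =>
    intro res i hi hf
    rw [housePresentsLoopB]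
    split
    case isTrue h =>
      have hile : i ≤ num := by nlinarith [sq_nonneg (i - 1)]
      rw [ih _ (i + 1) (by omega) (by push_cast at hf ⊢; omega)]
      have hins : Finset.Icc i num = insert i (Finset.Icc (i + 1) num) := by
        ext x; simp [Finset.mem_Icc]; omega
      have hnot : i ∉ Finset.Icc (i + 1) num := by simp [Finset.mem_Icc]
      rw [hins, Finset.sum_insert hnot,
        PySem.Int.floordiv_eq_ediv_of_pos (by omega : (0:Int) < i)]
      simp only [PySem.Int.mod_eq_zero_iff_dvd]
      simp only [contribB, if_pos h]
      split_ifs <;> ring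
    case isFalse h =>
      have hz : ∀ k ∈ Finset.Icc i num, (if k * k ≤ num then contribB num lo k else 0) = 0 := by
        intro k hk
        rw [Finset.mem_Icc] at hk
        have : ¬ k * k ≤ num := by nlinarith
        simp [this]
      rw [Finset.sum_eq_zero hz]; ring

-- Core identity: the [lo, num] divisor sum equals the √num pair enumeration.
theorem sum_divisors_pairing (num lo : Int) (hnum : 1 ≤ num) (hlo : 1 ≤ lo) :
    ∑ d ∈ Finset.Icc lo num, (if d ∣ num then d else 0)
      = ∑ k ∈ Finset.Icc (1 : Int) num, (if k * k ≤ num then contribB num lo k else 0) := by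
  -- Step 1: extend A's sum to [1, num] by adding the lower-bound condition to the term.
  have step0 : ∑ d ∈ Finset.Icc lo num, (if d ∣ num then d else 0)
      = ∑ d ∈ Finset.Icc lo num, (if d ∣ num ∧ lo ≤ d then d else 0) := by
    apply Finset.sum_congr rfl
    intro d hd
    rw [Finset.mem_Icc] at hd
    by_cases hdvd : d ∣ num <;> simp [hdvd, hd.1]
  have step1 : ∑ d ∈ Finset.Icc lo num, (if d ∣ num ∧ lo ≤ d then d else 0)
      = ∑ d ∈ Finset.Icc (1 : Int) num, (if d ∣ num ∧ lo ≤ d then d else 0) := by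
    apply Finset.sum_subset (Finset.Icc_subset_Icc (by omega) le_rfl)
    intro x hx hnx
    rw [Finset.mem_Icc] at hx
    rw [Finset.mem_Icc] at hnx
    have hxlo : ¬ lo ≤ x := by omega
    simp [hxlo]
  rw [step0, step1]
  -- Step 2: split both sides into "small" (k*k ≤ num) and "large" parts.
  have splitA : ∀ d : Int, (if d ∣ num ∧ lo ≤ d then d else 0)
      = (if d * d ≤ num ∧ d ∣ num ∧ lo ≤ d then d else 0)
        + (if num < d * d ∧ d ∣ num ∧ lo ≤ d then d else 0) := by
    intro d; by_cases h1 : d * d ≤ num <;> by_cases h2 : d ∣ num ∧ lo ≤ d <;>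
      simp [h1, h2]
  have splitB : ∀ k : Int, (if k * k ≤ num then contribB num lo k else 0)
      = (if k * k ≤ num ∧ k ∣ num ∧ lo ≤ k then k else 0)
        + (if k * k ≤ num ∧ k ∣ num ∧ num / k ≠ k ∧ lo ≤ num / k then num / k else 0) := by
    intro k
    by_cases h1 : k * k ≤ num
    · simp only [contribB, if_pos h1]
      by_cases h2 : k ∣ num
      · by_cases h3 : lo ≤ k <;> by_cases h4 : num / k ≠ k ∧ lo ≤ num / k <;>
          simp [h1, h2, h3, h4]
      · simp [h1, h2]
    · simp [h1]
  simp only [splitA, splitB, Finset.sum_add_distrib]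
  -- The "small" parts agree termwise; it remains to pair large divisors with small cofactors.
  congr 1
  -- Step 3: the bijection d ↦ num / d between large divisors and small cofactors.
  rw [← Finset.sum_filter (fun d => num < d * d ∧ d ∣ num ∧ lo ≤ d) (fun d => d),
    ← Finset.sum_filter (fun k => k * k ≤ num ∧ k ∣ num ∧ num / k ≠ k ∧ lo ≤ num / k)
      (fun k => num / k)]
  refine Finset.sum_nbij' (fun d => num / d) (fun k => num / k) ?_ ?_ ?_ ?_ ?_
  · -- forward: a large divisor d maps to a small cofactor num / d
    intro d hd
    simp only [Finset.mem_filter, Finset.mem_Icc] at hd ⊢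
    obtain ⟨⟨hd1, hdn⟩, hbig, hdvd, hlod⟩ := hd
    have hdpos : (0 : Int) < d := by omega
    have hmul : num / d * d = num := Int.ediv_mul_cancel hdvd
    have hq1 : 1 ≤ num / d := (Int.le_ediv_iff_mul_le hdpos).mpr (by omega)
    have hqlt : num / d < d := by nlinarith
    refine ⟨⟨hq1, Int.ediv_le_self d (by omega)⟩, by nlinarith, ⟨d, by linarith [hmul]⟩, ?_, ?_⟩
    · have : num / (num / d) = d := by
        have hq0 : num / d ≠ 0 := by omega
        calc num / (num / d) = num / d * d / (num / d) := by rw [hmul]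
          _ = d := Int.mul_ediv_cancel_left d hq0
      omega
    · have : num / (num / d) = d := by
        have hq0 : num / d ≠ 0 := by omega
        calc num / (num / d) = num / d * d / (num / d) := by rw [hmul]
          _ = d := Int.mul_ediv_cancel_left d hq0
      omega
  · -- backward: a small cofactor k maps to a large divisor num / k
    intro k hk
    simp only [Finset.mem_filter, Finset.mem_Icc] at hk ⊢
    obtain ⟨⟨hk1, hkn⟩, hsmall, hdvd, hne, hlok⟩ := hk
    have hkpos : (0 : Int) < k := by omega
    have hmul : num / k * k = num := Int.ediv_mul_cancel hdvd
    have hqk : k ≤ num / k := (Int.le_ediv_iff_mul_le hkpos).mpr hsmall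
    have hqgt : k < num / k := by omega
    have hq1 : 1 ≤ num / k := by omega
    refine ⟨⟨hq1, Int.ediv_le_self k (by omega)⟩, by nlinarith, ⟨k, by linarith [hmul]⟩, hlok⟩
  · -- left inverse
    intro d hd
    simp only [Finset.mem_filter, Finset.mem_Icc] at hd
    obtain ⟨⟨hd1, _⟩, _, hdvd, _⟩ := hd
    have hmul : num / d * d = num := Int.ediv_mul_cancel hdvd
    have hq1 : 1 ≤ num / d := (Int.le_ediv_iff_mul_le (by omega)).mpr (by omega)
    calc num / (num / d) = num / d * d / (num / d) := by rw [hmul]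
      _ = d := Int.mul_ediv_cancel_left d (by omega)
  · -- right inverse
    intro k hk
    simp only [Finset.mem_filter, Finset.mem_Icc] at hk
    obtain ⟨⟨hk1, _⟩, _, hdvd, _⟩ := hk
    have hmul : num / k * k = num := Int.ediv_mul_cancel hdvd
    have hq1 : 1 ≤ num / k := (Int.le_ediv_iff_mul_le (by omega)).mpr (by omega)
    calc num / (num / k) = num / k * k / (num / k) := by rw [hmul]
      _ = k := Int.mul_ediv_cancel_left k (by omega)
  · -- values agree: d = num / (num / d)
    intro d hd
    simp only [Finset.mem_filter, Finset.mem_Icc] at hd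
    obtain ⟨⟨hd1, _⟩, _, hdvd, _⟩ := hd
    have hmul : num / d * d = num := Int.ediv_mul_cancel hdvd
    have hq1 : 1 ≤ num / d := (Int.le_ediv_iff_mul_le (by omega)).mpr (by omega)
    calc d = num / d * d / (num / d) := (Int.mul_ediv_cancel_left d (by omega)).symm
      _ = num / (num / d) := by rw [hmul]

-- ===== VERDICT (by name: the statement is the Claim_ definition above) =====
theorem housePresents_spec : Claim_equal_housePresents := by
  intro num _
  unfold Spec_housePresents housePresents housePresents_alt
  have hlo : (1 : Int) ≤ max (PySem.Int.floordiv num 50) 1 := le_max_right _ _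
  by_cases hpos : 1 ≤ num
  · rw [loopA_eq num _ 0 _ (by omega),
      loopB_eq num _ _ 0 1 le_rfl (by omega),
      sum_divisors_pairing num _ hpos hlo]
  · have hA : ¬ max (PySem.Int.floordiv num 50) 1 ≤ num := by omega
    have hB : ¬ (1 : Int) * 1 ≤ num := by omega
    have hfA : (num + 1 - max (PySem.Int.floordiv num 50) 1).toNat = 0 := by omega
    rw [hfA]
    cases hn : num.toNat with
    | zero => rfl
    | succ m => rw [housePresentsLoopB, if_neg hB]; rfl
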